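-- pv_equiv track=rewrite | github.com/bangtugu/Algorithm | BAEKJOON/7490_0_만들기.py | calc
-- ===== SOURCE A (Python) =====
-- def calc(string):
--     temp = ''
--     for a in string.split():
--         temp += a
--
--     result = 0
--     numb = ''
--     for a in reversed(temp):
--         if a == '+':
--             result += int(numb)
--             numb = ''
--         elif a == '-':
--             result -= int(numb)
--             numb = ''
--         else:
--             numb = a + numb
--     result += int(numb)
--
--     if not result: return True
--     return False
-- ===== SOURCE B (Python) =====
-- def calc(string):
--     expr = ''.join(string.split())
--     nums, ops, cur = [], [], ''
--     for ch in expr: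
--         if ch == '+' or ch == '-':
--             nums.append(cur)
--             ops.append(ch)
--             cur = ''
--         else:
--             cur += ch
--     nums.append(cur)
--     total = int(nums[0])
--     for op, tok in zip(ops, nums[1:]):
--         total = total + int(tok) if op == '+' else total - int(tok)
--     return total == 0
-- ===== Notes on version B (the rewrite author's own statement) =====
-- stated objective: alternative
-- what changed: A scans the de-spaced expression right-to-left, building each number by prepending characters and applying +/- when an operator char is met; B instead tokenises left-to-right into a list of number strings and a list of operators, then folds once over the zipped (operator, number) pairs to accumulate the total.
-- outside the precondition, e.g. on calc('+'): A raises ValueError, B raises ValueError; on calc('-'): A raises ValueError, B raises ValueError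
import Mathlib
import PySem

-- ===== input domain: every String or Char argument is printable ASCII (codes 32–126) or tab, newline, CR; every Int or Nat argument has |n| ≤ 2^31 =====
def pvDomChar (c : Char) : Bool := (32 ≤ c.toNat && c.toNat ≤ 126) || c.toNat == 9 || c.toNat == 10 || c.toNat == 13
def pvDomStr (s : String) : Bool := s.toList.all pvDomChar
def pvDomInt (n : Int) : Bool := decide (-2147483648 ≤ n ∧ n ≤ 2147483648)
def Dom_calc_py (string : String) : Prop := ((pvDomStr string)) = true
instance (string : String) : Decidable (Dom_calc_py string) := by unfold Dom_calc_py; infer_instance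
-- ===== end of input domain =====

-- B replaces A's reverse-direction scan (digit buffer built by prepending) with a forward
-- tokenisation into number/operator lists followed by a left fold; objective: alternative decomposition.

-- ===== PORT A =====
-- one step of A's reversed(temp) loop; Option models int('') / int(garbage) raising ValueError
def pvStepA (st : Option (Int × List Char)) (a : Char) : Option (Int × List Char) :=
  st.bind (fun rn =>
    if a = '+' then (PySem.Int.ofChars? rn.2).map (fun v => (rn.1 + v, ([] : List Char)))
    else if a = '-' then (PySem.Int.ofChars? rn.2).map (fun v => (rn.1 - v, ([] : List Char)))
    else some (rn.1, a :: rn.2))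

def calc_py (string : String) : Bool :=
  -- temp = '' ; for a in string.split(): temp += a
  let temp : List Char := (PySem.Chars.split₀ string.toList).foldl (fun acc a => acc ++ a) []
  -- for a in reversed(temp): …
  let st := temp.reverse.foldl pvStepA (some (0, ([] : List Char)))
  -- result += int(numb); if not result: return True; return False
  match st.bind (fun rn => (PySem.Int.ofChars? rn.2).map (fun v => rn.1 + v)) with
  | some r => r == 0
  | none => false        -- unreachable under Pre_calc_py (Python raises ValueError)

-- ===== PORT B =====
-- one step of B's tokenising loop over expr: state (nums, ops, cur)
def pvStepB (st : List (List Char) × List Char × List Char) (ch : Char) :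
    List (List Char) × List Char × List Char :=
  if ch = '+' ∨ ch = '-' then (st.1 ++ [st.2.2], st.2.1 ++ [ch], [])
  else (st.1, st.2.1, st.2.2 ++ [ch])

-- one step of B's evaluating loop over zip(ops, nums[1:])
def pvStepE (acc : Option Int) (p : Char × List Char) : Option Int :=
  acc.bind (fun t => (PySem.Int.ofChars? p.2).map
    (fun v => if p.1 = '+' then t + v else t - v))

def calc_py_alt (string : String) : Bool :=
  -- expr = ''.join(string.split())
  let expr : List Char := PySem.Chars.join [] (PySem.Chars.split₀ string.toList)
  let st := expr.foldl pvStepB ([], [], [])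
  let nums := st.1 ++ [st.2.2]   -- nums.append(cur) after the loop
  match nums with
  | [] => false                  -- unreachable: nums always gets at least one append
  | n0 :: rest =>
    match (st.2.1.zip rest).foldl pvStepE (PySem.Int.ofChars? n0) with
    | some total => total == 0
    | none => false              -- unreachable under Pre_calc_py (Python raises ValueError)

-- ===== PRECONDITION & SPEC =====
-- tokeniser used to state Pre_: first number-chunk and the (op, chunk) pairs of a char list
def pvTk : List Char → List Char × List (Char × List Char)
  | [] => ([], [])
  | c :: rest =>
    let p := pvTk rest
    if c = '+' ∨ c = '-' then ([], (c, p.1) :: p.2) else (c :: p.1, p.2)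

-- Pre_ excludes exactly the inputs on which Python's int(...) raises ValueError in A (and in B):
-- after dropping whitespace, every chunk between consecutive '+'/'-' signs must parse as an int
-- (so no empty expression, no leading/trailing/adjacent operators, no garbage chunks).
def Pre_calc_py (string : String) : Prop :=
  (let p := pvTk ((PySem.Chars.split₀ string.toList).foldl (fun acc a => acc ++ a) []);
   (PySem.Int.ofChars? p.1).isSome && p.2.all (fun q => (PySem.Int.ofChars? q.2).isSome)) = true
instance (string : String) : Decidable (Pre_calc_py string) := by unfold Pre_calc_py; infer_instance

def pvWitness_calc_py : String := "1 +2-3"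

def Spec_calc_py (string : String) (out : Bool) : Prop := out = calc_py_alt string
instance (string : String) (out : Bool) : Decidable (Spec_calc_py string out) := by unfold Spec_calc_py; infer_instance

-- ===== CLAIM (what is proved, stated in full; the proofs are below) =====
def Claim_equal_calc_py : Prop := ∀ (string : String), Dom_calc_py string → Pre_calc_py string → Spec_calc_py string (calc_py string)

-- ===== LEMMAS AND PROOFS =====

-- signed sum of the (op, chunk) pairs, leftmost first
def pvSumOps : List (Char × List Char) → Option Int
  | [] => some 0
  | (c, t) :: rest =>
    (PySem.Int.ofChars? t).bind (fun v =>
      (pvSumOps rest).map (fun s => (if c = '+' then v else -v) + s))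

-- A's loop, read as a foldr via List.foldl_reverse, computes (pvSumOps pairs, first chunk)
theorem pvAfold_eq (l : List Char) :
    l.foldr (fun a st => pvStepA st a) (some (0, ([] : List Char))) =
      (pvSumOps (pvTk l).2).map (fun s => (s, (pvTk l).1)) := by
  induction l with
  | nil => simp [pvTk, pvSumOps]
  | cons c rest ih =>
    simp only [List.foldr_cons, ih]
    by_cases h1 : c = '+'
    · simp only [pvTk, pvStepA, h1]
      cases hx : PySem.Int.ofChars? (pvTk rest).1 <;>
        cases hs : pvSumOps (pvTk rest).2 <;>
          simp [pvSumOps, hx, hs, Int.add_comm]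
    · by_cases h2 : c = '-'
      · simp only [pvTk, pvStepA, h2, if_neg h1]
        cases hx : PySem.Int.ofChars? (pvTk rest).1 <;>
          cases hs : pvSumOps (pvTk rest).2 <;>
            simp [pvSumOps, hx, hs] <;> omega
      · simp only [pvTk, pvStepA, h1, h2]
        have hor : ¬ (c = '+' ∨ c = '-') := by simp [h1, h2]
        simp only [hor, if_false]
        cases hs : pvSumOps (pvTk rest).2 <;> simp [hs]

-- B's tokenising foldl, with accumulators, in terms of pvTk
theorem pvBtok_eq (l : List Char) (nums : List (List Char)) (ops cur : List Char) :
    ((l.foldl pvStepB (nums, ops, cur)).1 ++ [(l.foldl pvStepB (nums, ops, cur)).2.2]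
        = nums ++ (cur ++ (pvTk l).1) :: (pvTk l).2.map Prod.snd)
    ∧ (l.foldl pvStepB (nums, ops, cur)).2.1 = ops ++ (pvTk l).2.map Prod.fst := by
  induction l generalizing nums ops cur with
  | nil => simp [pvTk]
  | cons c rest ih =>
    by_cases hc : c = '+' ∨ c = '-'
    · simp only [List.foldl_cons, pvStepB, hc, if_true, pvTk]
      obtain ⟨ha, hb⟩ := ih (nums ++ [cur]) (ops ++ [c]) []
      simp only [ha, hb]
      simp
    · simp only [List.foldl_cons, pvStepB, hc, if_false, pvTk]
      obtain ⟨ha, hb⟩ := ih nums ops (cur ++ [c])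
      simp only [ha, hb]
      simp

-- B's evaluating foldl in terms of pvSumOps
theorem pvBeval_eq (pairs : List (Char × List Char)) (acc : Option Int) :
    pairs.foldl pvStepE acc = acc.bind (fun t => (pvSumOps pairs).map (fun s => t + s)) := by
  induction pairs generalizing acc with
  | nil => cases acc <;> simp [pvSumOps]
  | cons p rest ih =>
    obtain ⟨c, t⟩ := p
    simp only [List.foldl_cons, ih]
    cases acc with
    | none => simp [pvStepE]
    | some a =>
      cases hx : PySem.Int.ofChars? t <;>
        cases hs : pvSumOps rest <;>
          simp [pvStepE, pvSumOps, hx, hs] <;> split_ifs <;> ring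

theorem pvFoldlAppend (parts : List (List Char)) (acc : List Char) :
    parts.foldl (fun acc a => acc ++ a) acc = acc ++ parts.flatten := by
  induction parts generalizing acc with
  | nil => simp
  | cons a tl ih => simp [ih]

-- ''.join(parts) is the same char list as folding += over parts
theorem pvJoin_eq (parts : List (List Char)) :
    PySem.Chars.join [] parts = parts.foldl (fun acc a => acc ++ a) [] := by
  rw [pvFoldlAppend]
  induction parts with
  | nil => simp [PySem.Chars.join_nil]
  | cons a tl ih =>
    cases tl with
    | nil => simp [PySem.Chars.join_singleton]
    | cons b tl2 => simp [PySem.Chars.join_cons_cons] at ih ⊢; simpa using ih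

theorem pvZipMap (P : List (Char × List Char)) :
    (P.map Prod.fst).zip (P.map Prod.snd) = P := by
  induction P with
  | nil => rfl
  | cons p rest ih => simp [ih]

-- ===== VERDICT (by name: the statement is the Claim_ definition above) =====
theorem calc_py_spec : Claim_equal_calc_py := by
  intro s _ _
  unfold Spec_calc_py calc_py calc_py_alt
  rw [pvJoin_eq]
  simp only []
  rw [List.foldl_reverse, pvAfold_eq]
  obtain ⟨h1, h2⟩ := pvBtok_eq
    ((PySem.Chars.split₀ s.toList).foldl (fun acc a => acc ++ a) []) [] [] []
  simp only [List.nil_append] at h1 h2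
  rw [h1, h2]
  simp only [pvZipMap, pvBeval_eq]
  cases hx : PySem.Int.ofChars?
      (pvTk ((PySem.Chars.split₀ s.toList).foldl (fun acc a => acc ++ a) [])).1 <;>
    cases hs : pvSumOps
        (pvTk ((PySem.Chars.split₀ s.toList).foldl (fun acc a => acc ++ a) [])).2 <;>
      simp [hx, Int.add_comm]
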